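-- pv_equiv track=rewrite | github.com/ns-cso/dashboard_mbn_v4 | data_processor.py | calculate_daily_stats
-- ===== SOURCE A (Python) =====
-- from collections import defaultdict
--
-- def calculate_daily_stats(dialogs):
--     """일별 대화량"""
--     daily = defaultdict(int)
--     for d in dialogs:
--         created_at = d.get('created_at', '')
--         if len(created_at) >= 10:
--             date_str = created_at[:10]
--             daily[date_str] += 1
--     return dict(sorted(daily.items()))
-- ===== SOURCE B (Python) =====
-- def calculate_daily_stats(dialogs):
--     """일별 대화량: sort the date prefixes once, then count consecutive runs."""
--     dates = [d.get('created_at', '')[:10] for d in dialogs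
--              if len(d.get('created_at', '')) >= 10]
--     dates.sort()
--     result = {}
--     prev = None
--     count = 0
--     for date in dates:
--         if date == prev:
--             count += 1
--         else:
--             if prev is not None:
--                 result[prev] = count
--             prev = date
--             count = 1
--     if prev is not None:
--         result[prev] = count
--     return result
-- ===== Notes on version B (the rewrite author's own statement) =====
-- stated objective: alternative
-- what changed: Instead of accumulating counts in a defaultdict and sorting its items at the end, B extracts the list of 10-char date prefixes, sorts that list, and counts consecutive runs in one linear scan, inserting each run's length into the result dict in ascending key order.
import Mathlib
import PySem

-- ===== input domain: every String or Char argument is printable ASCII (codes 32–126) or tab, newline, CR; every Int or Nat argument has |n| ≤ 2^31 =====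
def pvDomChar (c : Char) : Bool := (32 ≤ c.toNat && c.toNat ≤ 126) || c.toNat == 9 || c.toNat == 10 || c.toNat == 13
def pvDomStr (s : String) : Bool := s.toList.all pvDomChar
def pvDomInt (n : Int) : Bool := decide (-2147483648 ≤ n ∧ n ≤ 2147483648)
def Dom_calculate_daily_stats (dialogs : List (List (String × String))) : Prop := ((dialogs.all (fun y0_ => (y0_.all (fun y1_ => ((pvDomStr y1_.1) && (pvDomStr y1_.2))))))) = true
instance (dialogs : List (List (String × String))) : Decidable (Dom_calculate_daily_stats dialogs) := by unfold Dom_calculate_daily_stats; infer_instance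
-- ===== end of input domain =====

-- B counts runs of the sorted date prefixes instead of A's defaultdict-accumulate-then-sort; return values proved equal.

-- ===== PORT A =====
def calculate_daily_stats (dialogs : List (List (String × String))) : List (String × Int) :=
  let daily := dialogs.foldl (fun daily d =>
      let created_at := (PySem.Dict.mk d).getD "created_at" ""
      if 10 ≤ PySem.Str.len created_at then
        let date_str := PySem.Str.slice created_at none (some 10)
        daily.modify date_str 0 (· + 1)
      else daily)
    (PySem.Dict.empty : PySem.Dict String Int)
  (PySem.Dict.ofList (PySem.List.sorted2 daily.items (fun p => p.1) (fun p => p.2))).items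

-- ===== PORT B =====
-- B-side helpers: the body of B's for-loop (state = (result, prev, count)) and the final flush
def pvStepB (st : PySem.Dict String Int × Option String × Int) (date : String) :
    PySem.Dict String Int × Option String × Int :=
  if some date = st.2.1 then (st.1, st.2.1, st.2.2 + 1)
  else
    match st.2.1 with
    | some p => (st.1.insert p st.2.2, some date, 1)
    | none => (st.1, some date, 1)

def pvFlushB (st : PySem.Dict String Int × Option String × Int) : PySem.Dict String Int :=
  match st.2.1 with
  | some p => st.1.insert p st.2.2
  | none => st.1

def calculate_daily_stats_alt (dialogs : List (List (String × String))) : List (String × Int) :=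
  let dates := PySem.List.sorted
    (dialogs.filterMap (fun d =>
      if 10 ≤ PySem.Str.len ((PySem.Dict.mk d).getD "created_at" "") then
        some (PySem.Str.slice ((PySem.Dict.mk d).getD "created_at" "") none (some 10))
      else none))
    (fun x => x)
  (pvFlushB (dates.foldl pvStepB ((PySem.Dict.empty : PySem.Dict String Int), none, 0))).items

-- ===== PRECONDITION & SPEC =====
def Spec_calculate_daily_stats (dialogs : List (List (String × String))) (out : List (String × Int)) : Prop := out = calculate_daily_stats_alt dialogs
instance (dialogs : List (List (String × String))) (out : List (String × Int)) : Decidable (Spec_calculate_daily_stats dialogs out) := by unfold Spec_calculate_daily_stats; infer_instance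

-- ===== CLAIM (what is proved, stated in full; the proofs are below) =====
def Claim_equal_calculate_daily_stats : Prop := ∀ (dialogs : List (List (String × String))), Dom_calculate_daily_stats dialogs → Spec_calculate_daily_stats dialogs (calculate_daily_stats dialogs)

-- ===== LEMMAS AND PROOFS =====

-- the list of 10-char date prefixes both programs count
def pvDates (dialogs : List (List (String × String))) : List String :=
  dialogs.filterMap (fun d =>
    if 10 ≤ PySem.Str.len ((PySem.Dict.mk d).getD "created_at" "") then
      some (PySem.Str.slice ((PySem.Dict.mk d).getD "created_at" "") none (some 10))
    else none)

-- the common normal form: distinct dates in ascending order, each with its multiplicity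
def pvCanon (dialogs : List (List (String × String))) : List (String × Int) :=
  (PySem.List.sorted (PySem.Set.ofList (pvDates dialogs)) (fun x => x)).map
    (fun k => (k, (List.count k (pvDates dialogs) : Int)))

-- run-length counting of a sorted list, current run (p, c) open
def pvRuns (p : String) (c : Int) : List String → List (String × Int)
  | [] => [(p, c)]
  | x :: t => if x = p then pvRuns p (c + 1) t else (p, c) :: pvRuns x 1 t

lemma pv_discard_of_not_mem {α : Type} [BEq α] [LawfulBEq α] (s : PySem.Set α) (x : α)
    (h : x ∉ s) : PySem.Set.discard s x = s := by
  unfold PySem.Set.discard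
  apply List.filter_eq_self.mpr
  intro y hy
  have hne : y ≠ x := fun he => h (he ▸ hy)
  simp [hne]

lemma pv_ofList_pairwise_lt (l : List String) (h : l.Pairwise (· ≤ ·)) :
    (PySem.Set.ofList l).Pairwise (· < ·) := by
  induction l with
  | nil => simp [PySem.Set.ofList_nil]
  | cons x t ih =>
    rw [PySem.Set.ofList_cons]
    refine List.Pairwise.cons ?_ ?_
    · intro y hy
      rcases (PySem.Set.mem_discard _ _ _).mp hy with ⟨hy', hne⟩
      have := List.rel_of_pairwise_cons h ((PySem.Set.mem_ofList _ _).mp hy')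
      exact lt_of_le_of_ne this (Ne.symm hne)
    · exact List.Pairwise.filter _ (ih h.of_cons)

-- A's accumulation loop over dialogs is Counter(pvDates dialogs)
lemma pv_dailyA (l : List (List (String × String))) (d : PySem.Dict String Int) :
    l.foldl (fun daily d' =>
        let created_at := (PySem.Dict.mk d').getD "created_at" ""
        if 10 ≤ PySem.Str.len created_at then
          let date_str := PySem.Str.slice created_at none (some 10)
          daily.modify date_str 0 (· + 1)
        else daily) d
      = (l.filterMap (fun d' =>
          if 10 ≤ PySem.Str.len ((PySem.Dict.mk d').getD "created_at" "") then
            some (PySem.Str.slice ((PySem.Dict.mk d').getD "created_at" "") none (some 10))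
          else none)).foldl (fun acc k => acc.modify k 0 (· + 1)) d := by
  induction l generalizing d with
  | nil => rfl
  | cons x t ih =>
    simp only [List.foldl_cons, List.filterMap_cons]
    by_cases hx : 10 ≤ PySem.Str.len ((PySem.Dict.mk x).getD "created_at" "")
    · simp only [hx, if_pos, List.foldl_cons]; exact ih _
    · simp only [hx, if_false]; exact ih _

lemma pv_insertBy_congr {α : Type} (b1 b2 : α → α → Bool) (x : α) (ys : List α)
    (h : ∀ y ∈ ys, b1 x y = b2 x y) :
    PySem.List.insertBy b1 x ys = PySem.List.insertBy b2 x ys := by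
  induction ys with
  | nil => rfl
  | cons y t ih =>
    simp only [PySem.List.insertBy]
    rw [h y (by simp)]
    by_cases hb : b2 x y = true
    · simp [hb]
    · simp only [Bool.not_eq_true] at hb
      simp [hb, ih (fun z hz => h z (by simp [hz]))]

lemma pv_foldl_insertBy_congr {α : Type} (b1 b2 : α → α → Bool) (xs acc : List α)
    (h : ∀ a b, (a ∈ xs ∨ a ∈ acc) → (b ∈ xs ∨ b ∈ acc) → b1 a b = b2 a b) :
    xs.foldl (fun acc x => PySem.List.insertBy b1 x acc) acc
      = xs.foldl (fun acc x => PySem.List.insertBy b2 x acc) acc := by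
  induction xs generalizing acc with
  | nil => rfl
  | cons x t ih =>
    simp only [List.foldl_cons]
    rw [pv_insertBy_congr b1 b2 x acc (fun y hy => h x y (Or.inl (by simp)) (Or.inr hy))]
    refine ih _ ?_
    intro a b ha hb
    refine h a b ?_ ?_
    · rcases ha with ha | ha
      · exact Or.inl (by simp [ha])
      · rcases (PySem.List.mem_insertBy b2 x a acc).mp ha with rfl | ha'
        · exact Or.inl (by simp)
        · exact Or.inr ha'
    · rcases hb with hb | hb
      · exact Or.inl (by simp [hb])
      · rcases (PySem.List.mem_insertBy b2 x b acc).mp hb with rfl | hb'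
        · exact Or.inl (by simp)
        · exact Or.inr hb'

-- Python's tuple sort of pairs with pairwise-distinct first components sorts by the first component
lemma pv_sorted2_eq_sorted_fst (xs : List (String × Int)) (h : (xs.map (fun p => p.1)).Nodup) :
    PySem.List.sorted2 xs (fun p => p.1) (fun p => p.2) = PySem.List.sorted xs (fun p => p.1) := by
  have hinj : ∀ a ∈ xs, ∀ b ∈ xs, a.1 = b.1 → a = b := List.inj_on_of_nodup_map h
  unfold PySem.List.sorted2 PySem.List.sorted
  simp only [if_neg (by decide : ¬ (false = true))]
  apply pv_foldl_insertBy_congr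
  intro a b ha hb
  have ha' : a ∈ xs := by
    rcases ha with h' | h'
    · exact h'
    · simp at h'
  have hb' : b ∈ xs := by
    rcases hb with h' | h'
    · exact h'
    · simp at h'
  by_cases hfst : a.1 = b.1
  · have : a = b := hinj a ha' b hb' hfst
    subst this
    simp
  · rcases lt_or_gt_of_ne hfst with hlt | hgt
    · simp [hlt, not_lt_of_gt hlt]
    · simp [hgt, not_lt_of_gt hgt]

-- ofList on pairs with distinct keys keeps the items list
lemma pv_items_ofList (pairs : List (String × Int)) (h : (pairs.map (fun p => p.1)).Nodup) :
    (PySem.Dict.ofList pairs).items = pairs := by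
  unfold PySem.Dict.ofList PySem.Dict.update
  have := PySem.Dict.items_foldl_insert_fresh pairs (fun p => p.1) (fun p => p.2)
    (PySem.Dict.empty : PySem.Dict String Int)
    (fun a _ => PySem.Dict.contains_empty _) h
  simpa using this

lemma pv_A_eq (dialogs : List (List (String × String))) :
    calculate_daily_stats dialogs = pvCanon dialogs := by
  unfold calculate_daily_stats
  rw [pv_dailyA]
  have hc : (( (pvDates dialogs).foldl (fun acc k => acc.modify k 0 (· + 1))
      (PySem.Dict.empty : PySem.Dict String Int))) = PySem.Dict.counter (pvDates dialogs) := rfl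
  show (PySem.Dict.ofList (PySem.List.sorted2
      (((pvDates dialogs).foldl (fun acc k => acc.modify k 0 (· + 1))
        (PySem.Dict.empty : PySem.Dict String Int)).items)
      (fun p => p.1) (fun p => p.2))).items = pvCanon dialogs
  rw [hc, PySem.Dict.items_counter]
  set D := pvDates dialogs with hD
  set S := PySem.Set.ofList D with hS
  set g : String → String × Int := fun k => (k, (List.count k D : Int)) with hg
  have hmapfst : ((S.map g).map (fun p => p.1)) = S := by
    rw [List.map_map]
    simp [hg, Function.comp_def]
  have hnd : ((S.map g).map (fun p => p.1)).Nodup := by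
    rw [hmapfst]; exact PySem.Set.nodup_ofList D
  rw [pv_sorted2_eq_sorted_fst _ hnd]
  have hsorted : PySem.List.sorted (S.map g) (fun p => p.1)
      = (PySem.List.sorted S (fun x => x)).map g := by
    apply PySem.List.sorted_eq_of_perm_of_pairwise_lt
    · exact (PySem.List.sorted_perm S (fun x => x) false).map g
    · have := PySem.List.sorted_ofList_pairwise_lt (κ := String) D
      rw [← hS] at this
      exact List.pairwise_map.mpr (by simpa [hg] using this)
  rw [hsorted]
  rw [pv_items_ofList]
  · rfl
  · rw [List.map_map]
    have heq : ((PySem.List.sorted S (fun x => x)).map ((fun p => p.1) ∘ g))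
        = PySem.List.sorted S (fun x => x) := by
      simp [hg, Function.comp_def]
    rw [heq]
    exact (PySem.List.sorted_perm S (fun x => x) false).nodup_iff.mpr (PySem.Set.nodup_ofList D)

-- B's loop, started mid-run, flushes to the accumulated items followed by the runs
lemma pv_loopB (t : List String) (d : PySem.Dict String Int) (p : String) (c : Int)
    (ht : (p :: t).Pairwise (· ≤ ·)) (hd : ∀ k ∈ d.keys, k < p) :
    (pvFlushB (t.foldl pvStepB (d, some p, c))).items = d.items ++ pvRuns p c t := by
  induction t generalizing d p c with
  | nil =>
    have hpc : d.contains p = false := by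
      rw [← Bool.not_eq_true, PySem.Dict.contains_iff_mem_keys]
      intro hm; exact absurd rfl (ne_of_lt (hd p hm))
    simp [pvFlushB, pvRuns, PySem.Dict.items_insert_of_not_contains d c hpc]
  | cons x t ih =>
    by_cases hx : x = p
    · subst hx
      have hstep : pvStepB (d, some x, c) x = (d, some x, c + 1) := by
        simp [pvStepB]
      rw [List.foldl_cons, hstep]
      have ht' : (x :: t).Pairwise (· ≤ ·) := by
        refine List.Pairwise.cons ?_ ht.of_cons.of_cons
        intro y hy
        exact List.rel_of_pairwise_cons ht.of_cons hy
      rw [ih d x (c + 1) ht' hd]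
      simp [pvRuns]
    · have hpx : p < x := lt_of_le_of_ne (List.rel_of_pairwise_cons ht (by simp)) (Ne.symm hx)
      have hstep : pvStepB (d, some p, c) x = (d.insert p c, some x, 1) := by
        simp [pvStepB, hx]
      rw [List.foldl_cons, hstep]
      have hpc : d.contains p = false := by
        rw [← Bool.not_eq_true, PySem.Dict.contains_iff_mem_keys]
        intro hm; exact absurd rfl (ne_of_lt (hd p hm))
      have hd' : ∀ k ∈ (d.insert p c).keys, k < x := by
        intro k hk
        rw [PySem.Dict.keys_insert_of_not_contains d c hpc] at hk
        rcases List.mem_append.mp hk with hk | hk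
        · exact lt_trans (hd k hk) hpx
        · simp at hk; subst hk; exact hpx
      rw [ih (d.insert p c) x 1 ht.of_cons hd']
      rw [PySem.Dict.items_insert_of_not_contains d c hpc]
      simp [pvRuns, hx]

-- the runs of a sorted list are the distinct values with their multiplicities
lemma pv_runs_eq (s : List String) (p : String) (c : Int) (hs : (p :: s).Pairwise (· ≤ ·)) :
    pvRuns p c s = (p, c + (List.count p s : Int))
      :: (PySem.Set.discard (PySem.Set.ofList s) p).map (fun k => (k, (List.count k s : Int))) := by
  induction s generalizing p c with
  | nil => simp [pvRuns, PySem.Set.ofList_nil, PySem.Set.discard]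
  | cons x t ih =>
    by_cases hx : x = p
    · subst hx
      have ht' : (x :: t).Pairwise (· ≤ ·) := by
        refine List.Pairwise.cons ?_ hs.of_cons.of_cons
        intro y hy; exact List.rel_of_pairwise_cons hs.of_cons hy
      rw [pvRuns, if_pos rfl, ih x (c + 1) ht']
      have hnm : x ∉ PySem.Set.discard (PySem.Set.ofList t) x := by
        intro hm; exact ((PySem.Set.mem_discard _ _ _).mp hm).2 rfl
      rw [PySem.Set.ofList_cons]
      have hdd : PySem.Set.discard (x :: PySem.Set.discard (PySem.Set.ofList t) x) x
          = PySem.Set.discard (PySem.Set.ofList t) x := by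
        show List.filter _ (x :: _) = _
        rw [List.filter_cons_of_neg (by simp)]
        exact pv_discard_of_not_mem _ x hnm
      rw [hdd]
      congr 1
      · have : (List.count x (x :: t) : Int) = (List.count x t : Int) + 1 := by
          simp
        rw [this]; ring_nf
      · apply List.map_congr_left
        intro k hk
        have hkne : k ≠ x := ((PySem.Set.mem_discard _ _ _).mp hk).2
        simp [Ne.symm hkne]
    · have hpx : p < x := lt_of_le_of_ne (List.rel_of_pairwise_cons hs (by simp)) (Ne.symm hx)
      rw [pvRuns, if_neg hx, ih x 1 hs.of_cons]
      have hpt : p ∉ x :: t := by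
        intro hm
        rcases List.mem_cons.mp hm with rfl | hm
        · exact absurd rfl (ne_of_lt hpx)
        · exact absurd rfl (ne_of_lt (lt_of_lt_of_le hpx (List.rel_of_pairwise_cons hs.of_cons hm)))
      have hcp : List.count p (x :: t) = 0 := List.count_eq_zero.mpr hpt
      have hnp : p ∉ PySem.Set.discard (PySem.Set.ofList t) x := by
        intro hm
        have := ((PySem.Set.mem_discard _ _ _).mp hm).1
        have hmem : p ∈ t := (PySem.Set.mem_ofList _ _).mp this
        exact absurd rfl (ne_of_lt (lt_of_lt_of_le hpx (List.rel_of_pairwise_cons hs.of_cons hmem)))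
      rw [PySem.Set.ofList_cons]
      have hdp : PySem.Set.discard (x :: PySem.Set.discard (PySem.Set.ofList t) x) p
          = x :: PySem.Set.discard (PySem.Set.ofList t) x := by
        show List.filter _ (x :: _) = _
        rw [List.filter_cons_of_pos (by simp [hx])]
        exact congrArg (x :: ·) (pv_discard_of_not_mem _ p hnp)
      rw [hdp, hcp]
      simp only [List.map_cons]
      congr 1
      · norm_num
      congr 1
      · have : List.count x (x :: t) = List.count x t + 1 := by simp
        rw [this]; push_cast; ring_nf
      · apply List.map_congr_left
        intro k hk
        have hkne : k ≠ x := ((PySem.Set.mem_discard _ _ _).mp hk).2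
        simp [Ne.symm hkne]

lemma pv_B_eq (dialogs : List (List (String × String))) :
    calculate_daily_stats_alt dialogs = pvCanon dialogs := by
  unfold calculate_daily_stats_alt
  show (pvFlushB ((PySem.List.sorted (pvDates dialogs) (fun x => x)).foldl pvStepB
      ((PySem.Dict.empty : PySem.Dict String Int), none, 0))).items = pvCanon dialogs
  set D := pvDates dialogs with hD
  rcases hs : PySem.List.sorted D (fun x => x) with _ | ⟨m, t⟩
  · have hDnil : D = [] := (PySem.List.sorted_eq_nil_iff D _ false).mp hs
    unfold pvCanon
    rw [← hD, hDnil]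
    simp [PySem.Set.ofList_nil, pvFlushB, PySem.Dict.empty]
    rfl
  · have hpair : (m :: t).Pairwise (· ≤ ·) := by
      have := PySem.List.sorted_pairwise D (fun x => x)
      rwa [hs] at this
    have hstep : pvStepB ((PySem.Dict.empty : PySem.Dict String Int), none, 0) m
        = ((PySem.Dict.empty : PySem.Dict String Int), some m, 1) := by
      simp [pvStepB]
    rw [List.foldl_cons, hstep,
      pv_loopB t (PySem.Dict.empty : PySem.Dict String Int) m 1 hpair
        (by simp [PySem.Dict.keys_empty]),
      pv_runs_eq t m 1 hpair]
    -- now compute the canonical form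
    have hperm : (m :: t).Perm D := by
      have := PySem.List.sorted_perm D (fun x => x) false
      rwa [hs] at this
    have hthis : PySem.List.sorted (PySem.Set.ofList D) (fun x => x) = PySem.Set.ofList (m :: t) := by
      apply PySem.List.sorted_eq_of_perm_of_pairwise_lt
      · refine (List.perm_ext_iff_of_nodup (PySem.Set.nodup_ofList _) (PySem.Set.nodup_ofList _)).mpr ?_
        intro a
        rw [PySem.Set.mem_ofList, PySem.Set.mem_ofList]
        exact ⟨fun h => hperm.mem_iff.mp h, fun h => hperm.mem_iff.mpr h⟩
      · exact pv_ofList_pairwise_lt _ hpair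
    unfold pvCanon
    rw [← hD, hthis, PySem.Set.ofList_cons, List.map_cons]
    have hcnt : ∀ k, List.count k D = List.count k (m :: t) := fun k => (hperm.count_eq k).symm
    have hemp : (PySem.Dict.empty : PySem.Dict String Int).items = [] := rfl
    rw [hemp, List.nil_append]
    congr 1
    · have : List.count m (m :: t) = List.count m t + 1 := by simp
      rw [hcnt m, this]; push_cast; ring_nf
    · apply List.map_congr_left
      intro k hk
      have hkne : k ≠ m := ((PySem.Set.mem_discard _ _ _).mp hk).2
      rw [hcnt k]
      simp [Ne.symm hkne]

-- ===== VERDICT (by name: the statement is the Claim_ definition above) =====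
theorem calculate_daily_stats_spec : Claim_equal_calculate_daily_stats := by
  intro dialogs _
  unfold Spec_calculate_daily_stats
  rw [pv_A_eq, pv_B_eq]
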